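-- pv_equiv track=rewrite | github.com/EinarK2/einark2.github.io | Forritun/Forritun 3/upprifjun.py | word_mixer
-- ===== SOURCE A (Python) =====
-- def word_mixer(word_list):
--     new_words = []
--     word_list.sort()
--     while len(word_list) > 5:
--         new_words.append(word_list.pop(-5))
--         new_words.append(word_list.pop(0))
--         new_words.append(word_list.pop(-1))
--         new_words.append('\n')
--     return new_words
-- ===== SOURCE B (Python) =====
-- def word_mixer(word_list):
--     # One pass over the sorted words: the only elements whose positions matter
--     # are the current first word, and a window of the last five words.  Keep
--     # that window in a small buffer refilled from the array, so nothing is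
--     # ever shifted.  (Like A, this sorts word_list in place.)
--     word_list.sort()
--     new_words = []
--     lo, hi = 0, len(word_list)
--     tail = []  # the rightmost words of what remains
--     while (hi - lo) + len(tail) > 5:
--         while len(tail) < 5:
--             hi -= 1
--             tail.insert(0, word_list[hi])
--         new_words.append(tail.pop(0))      # fifth word from the end
--         new_words.append(word_list[lo])    # first word
--         lo += 1
--         new_words.append(tail.pop())       # last word
--         new_words.append('\n')
--     return new_words
-- ===== Notes on version B (the rewrite author's own statement) =====
-- stated objective: faster
-- what changed: Replaces the quadratic pop(-5)/pop(0)/pop(-1) list-mutation loop with a linear two-pointer scan over the sorted array plus a five-element buffer for the right end, so no list element is ever shifted.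
import Mathlib
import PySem

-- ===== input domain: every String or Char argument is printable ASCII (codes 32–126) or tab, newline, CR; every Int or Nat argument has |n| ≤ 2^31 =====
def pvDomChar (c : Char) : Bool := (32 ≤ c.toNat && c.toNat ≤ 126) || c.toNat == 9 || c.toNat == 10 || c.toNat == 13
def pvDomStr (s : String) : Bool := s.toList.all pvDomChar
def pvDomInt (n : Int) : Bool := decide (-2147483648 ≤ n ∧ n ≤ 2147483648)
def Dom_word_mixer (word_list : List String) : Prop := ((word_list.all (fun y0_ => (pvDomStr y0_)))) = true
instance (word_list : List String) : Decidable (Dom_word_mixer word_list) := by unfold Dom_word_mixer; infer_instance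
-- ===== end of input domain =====

-- B replaces A's quadratic pop(-5)/pop(0)/pop(-1) mutation loop by a linear
-- two-pointer scan over the sorted list with a five-element buffer for the
-- right end (return-value equivalence: A also consumes its argument in place,
-- B only sorts it; a Python caller can observe that).

-- ===== PORT A =====
-- the while loop; fuel = initial list length (strictly more than the iteration count)
def wmLoopA : Nat → List String → List String → List String
  | 0, _, acc => acc
  | fuel + 1, wl, acc =>
    if 5 < wl.length then
      match PySem.List.pop? wl (-5) with
      | some (w1, wl1) =>
        match PySem.List.pop? wl1 0 with
        | some (w2, wl2) =>
          match PySem.List.pop? wl2 (-1) with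
          | some (w3, wl3) => wmLoopA fuel wl3 (acc ++ [w1] ++ [w2] ++ [w3] ++ ["\n"])
          | none => acc
        | none => acc
      | none => acc
    else acc

def word_mixer (word_list : List String) : List String :=
  wmLoopA word_list.length (PySem.List.sorted word_list (fun x => x) false) []

-- ===== PORT B =====
-- the inner refill `while len(tail) < 5: hi -= 1; tail.insert(0, word_list[hi])`;
-- fuel 5 suffices since each step grows tail by one and the loop stops at 5.
-- word_list[hi] is always in range here, so getD is exact for the indexing.
def wmFill : Nat → List String → Nat → List String → Nat × List String
  | 0, _, hi, tail => (hi, tail)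
  | f + 1, s, hi, tail =>
    if tail.length < 5 then wmFill f s (hi - 1) (s.getD (hi - 1) "" :: tail)
    else (hi, tail)

-- the outer while loop of B; fuel = initial list length
def wmLoopB : Nat → List String → Nat → Nat → List String → List String → List String
  | 0, _, _, _, _, acc => acc
  | f + 1, s, lo, hi, tail, acc =>
    if 5 < (hi - lo) + tail.length then
      match PySem.List.pop? (wmFill 5 s hi tail).2 0 with
      | some (w1, t1) =>
        match PySem.List.pop? t1 (-1) with
        | some (w3, t2) =>
            wmLoopB f s (lo + 1) (wmFill 5 s hi tail).1 t2 (acc ++ [w1, s.getD lo "", w3, "\n"])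
        | none => acc
      | none => acc
    else acc

def word_mixer_alt (word_list : List String) : List String :=
  let s := PySem.List.sorted word_list (fun x => x) false
  wmLoopB s.length s 0 s.length [] []

-- ===== PRECONDITION & SPEC =====
def Spec_word_mixer (word_list : List String) (out : List String) : Prop := out = word_mixer_alt word_list
instance (word_list : List String) (out : List String) : Decidable (Spec_word_mixer word_list out) := by unfold Spec_word_mixer; infer_instance

-- ===== CLAIM (what is proved, stated in full; the proofs are below) =====
def Claim_equal_word_mixer : Prop := ∀ (word_list : List String), Dom_word_mixer word_list → Spec_word_mixer word_list (word_mixer word_list)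

-- ===== LEMMAS AND PROOFS =====

-- Closed-form description of the output, used only by the proofs: block j of
-- the result, the number of blocks, and their concatenation.
def wmBlockN (s : List String) (j : Nat) : List String :=
  [s.getD (s.length - 5 - 2 * j) "", s.getD j "",
   s.getD (if j < 4 then s.length - 1 - j else s.length + 2 - 2 * j) "", "\n"]

def wmKN (s : List String) : Nat := if 5 < s.length then (s.length - 3) / 3 else 0

def wmCFN (s : List String) : List String := (List.range (wmKN s)).flatMap (wmBlockN s)

-- pop? shapes used by one iteration of A's loop
theorem wm_popm5 (s : List String) (h : 5 < s.length) :
    PySem.List.pop? s (-5) = some (s.getD (s.length - 5) "", s.eraseIdx (s.length - 5)) := by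
  rw [show ((-5 : Int)) = -((5:Nat):Int) by norm_num]
  simp [PySem.List.pop?, PySem.List.pyIdx?, (by omega : 5 ≤ s.length), List.getD_eq_getElem?_getD,
        List.getElem?_eq_getElem (by omega : s.length - 5 < s.length)]

theorem wm_pop0 (s : List String) (h : 0 < s.length) :
    PySem.List.pop? s 0 = some (s.getD 0 "", s.tail) := by
  simp [PySem.List.pop?, PySem.List.pyIdx?, h, List.getD_eq_getElem?_getD, List.eraseIdx_zero]

theorem wm_popm1 (s : List String) (h : 0 < s.length) :
    PySem.List.pop? s (-1) = some (s.getD (s.length - 1) "", s.dropLast) := by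
  rw [show ((-1 : Int)) = -((1:Nat):Int) by norm_num]
  simp [PySem.List.pop?, PySem.List.pyIdx?, (by omega : 1 ≤ s.length), List.getD_eq_getElem?_getD,
        List.getElem?_eq_getElem (by omega : s.length - 1 < s.length),
        (List.dropLast_eq_eraseIdx (by omega : s.length - 1 + 1 = s.length)).symm]

theorem wm_s3_len (s : List String) (h5 : 5 < s.length) :
    (((s.eraseIdx (s.length - 5)).tail).dropLast).length = s.length - 3 := by
  simp only [List.length_dropLast, List.length_tail, List.length_eraseIdx]
  split_ifs <;> omega

-- elements of the list after one iteration, in terms of the original list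
theorem wm_s3_get (s : List String) (i : Nat) (h5 : 5 < s.length) (hi : i < s.length - 3) :
    (((s.eraseIdx (s.length - 5)).tail).dropLast).getD i "" =
      s.getD (if i < s.length - 6 then i + 1 else i + 2) "" := by
  have hle : (s.eraseIdx (s.length - 5)).length = s.length - 1 := by
    rw [List.length_eraseIdx, if_pos (by omega)]
  simp only [List.getD_eq_getElem?_getD, List.getElem?_dropLast, List.getElem?_tail,
    List.getElem?_eraseIdx, List.length_tail, hle]
  split_ifs with h1 h2 h3 <;> first | rfl | omega

-- one block of the closed form, shifted through one iteration of A's loop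
theorem wm_block_step (s : List String) (j : Nat) (h5 : 5 < s.length)
    (hj : j < (s.length - 6) / 3) :
    wmBlockN (((s.eraseIdx (s.length - 5)).tail).dropLast) j = wmBlockN s (j + 1) := by
  have hm : 8 < s.length := by omega
  have hlen := wm_s3_len s h5
  have e1 : (((s.eraseIdx (s.length - 5)).tail).dropLast).getD (s.length - 3 - 5 - 2 * j) "" =
      s.getD (s.length - 5 - 2 * (j + 1)) "" := by
    rw [wm_s3_get s _ h5 (by omega), if_pos (by omega)]
    congr 1; omega
  have e2 : (((s.eraseIdx (s.length - 5)).tail).dropLast).getD j "" = s.getD (j + 1) "" := by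
    rw [wm_s3_get s _ h5 (by omega), if_pos (by omega)]
  have e3 : (((s.eraseIdx (s.length - 5)).tail).dropLast).getD
      (if j < 4 then s.length - 3 - 1 - j else s.length - 3 + 2 - 2 * j) "" =
      s.getD (if j + 1 < 4 then s.length - 1 - (j + 1) else s.length + 2 - 2 * (j + 1)) "" := by
    by_cases h4 : j < 3
    · rw [if_pos (by omega), wm_s3_get s _ h5 (by omega), if_neg (by omega), if_pos (by omega)]
      congr 1; omega
    · by_cases h4' : j < 4
      · rw [if_pos (by omega), wm_s3_get s _ h5 (by omega), if_pos (by omega), if_neg (by omega)]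
        congr 1; omega
      · rw [if_neg (by omega), wm_s3_get s _ h5 (by omega), if_pos (by omega), if_neg (by omega)]
        congr 1; omega
  unfold wmBlockN
  rw [hlen, e1, e2, e3]

theorem wm_cfn_nil (s : List String) (h : s.length ≤ 5) : wmCFN s = [] := by
  unfold wmCFN wmKN
  rw [if_neg (by omega)]
  simp

-- the recurrence: the closed form satisfies exactly A's loop step
theorem wm_cfn_step (s : List String) (h5 : 5 < s.length) :
    wmCFN s = wmBlockN s 0 ++ wmCFN (((s.eraseIdx (s.length - 5)).tail).dropLast) := by
  have hlen := wm_s3_len s h5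
  have hk3 : wmKN (((s.eraseIdx (s.length - 5)).tail).dropLast) = (s.length - 6) / 3 := by
    unfold wmKN
    rw [hlen]
    split_ifs with h <;> omega
  have hk : wmKN s = (s.length - 6) / 3 + 1 := by
    unfold wmKN
    rw [if_pos h5]
    omega
  unfold wmCFN
  rw [hk, hk3, List.range_succ_eq_map, List.flatMap_cons, List.flatMap_map]
  congr 1
  rw [List.flatMap_def, List.flatMap_def]
  congr 1
  refine List.map_congr_left (fun j hj => ?_)
  rw [List.mem_range] at hj
  exact (wm_block_step s j h5 hj).symm

-- A's loop computes the closed form (fuel ≥ current length suffices)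
theorem wm_loop (fuel : Nat) : ∀ (s acc : List String), s.length ≤ fuel →
    wmLoopA fuel s acc = acc ++ wmCFN s := by
  induction fuel with
  | zero =>
    intro s acc h
    rw [wm_cfn_nil s (by omega)]
    simp [wmLoopA]
  | succ fuel ih =>
    intro s acc h
    by_cases h5 : 5 < s.length
    · have h1 : (s.eraseIdx (s.length - 5)).length = s.length - 1 := by
        rw [List.length_eraseIdx, if_pos (by omega)]
      have h2 : ((s.eraseIdx (s.length - 5)).tail).length = s.length - 2 := by
        rw [List.length_tail, h1]
        omega
      have h3 := wm_s3_len s h5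
      rw [wmLoopA]
      rw [if_pos h5]
      simp only [wm_popm5 s h5, wm_pop0 (s.eraseIdx (s.length - 5)) (by omega),
        wm_popm1 ((s.eraseIdx (s.length - 5)).tail) (by omega)]
      rw [ih _ _ (by omega)]
      rw [wm_cfn_step s h5]
      have w2 : (s.eraseIdx (s.length - 5)).getD 0 "" = s.getD 0 "" := by
        simp only [List.getD_eq_getElem?_getD, List.getElem?_eraseIdx, if_pos (by omega : 0 < s.length - 5)]
      have w3 : ((s.eraseIdx (s.length - 5)).tail).getD (((s.eraseIdx (s.length - 5)).tail).length - 1) "" =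
          s.getD (s.length - 1) "" := by
        rw [h2]
        simp only [List.getD_eq_getElem?_getD, List.getElem?_tail, List.getElem?_eraseIdx]
        rw [if_neg (by omega)]
        congr 2
        omega
      rw [w2, w3]
      simp [wmBlockN]
    · rw [wmLoopA, if_neg h5, wm_cfn_nil s (by omega)]
      simp

-- the refill loop: moves the top 5 - |tail| elements of s.take hi onto tail
theorem wm_fill (f : Nat) : ∀ (s : List String) (hi : Nat) (tail : List String),
    5 ≤ tail.length + f → 5 - tail.length ≤ hi → hi ≤ s.length →
    wmFill f s hi tail =
      (hi - (5 - tail.length), (s.take hi).drop (hi - (5 - tail.length)) ++ tail) := by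
  induction f with
  | zero =>
    intro s hi tail h1 h2 h3
    have : 5 - tail.length = 0 := by omega
    rw [this]
    simp [wmFill]
  | succ f ih =>
    intro s hi tail h1 h2 h3
    rw [wmFill]
    by_cases h5 : tail.length < 5
    · rw [if_pos h5]
      rw [ih s (hi - 1) (s.getD (hi - 1) "" :: tail) (by simp; omega) (by simp; omega) (by omega)]
      have hhi : 1 ≤ hi := by omega
      have hk : hi - 1 - (5 - (s.getD (hi - 1) "" :: tail).length) = hi - (5 - tail.length) := by
        simp only [List.length_cons]
        omega
      rw [hk]
      congr 1
      have htake : s.take hi = s.take (hi - 1) ++ [s.getD (hi - 1) ""] := by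
        conv_lhs => rw [show hi = (hi - 1) + 1 by omega]
        rw [List.take_add_one]
        congr 1
        rw [List.getElem?_eq_getElem (by omega : hi - 1 < s.length)]
        simp [List.getD_eq_getElem?_getD, List.getElem?_eq_getElem (by omega : hi - 1 < s.length)]
      rw [htake, List.drop_append_of_le_length (by rw [List.length_take]; omega)]
      simp
    · rw [if_neg h5]
      have : 5 - tail.length = 0 := by omega
      rw [this]
      simp

-- B's loop computes the closed form of the remaining combined list
theorem wm_loopB (f : Nat) : ∀ (s : List String) (lo hi : Nat) (tail acc : List String),
    lo ≤ hi → hi ≤ s.length → tail.length ≤ 5 →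
    (hi - lo) + tail.length ≤ 3 * f + 5 →
    wmLoopB f s lo hi tail acc = acc ++ wmCFN ((s.take hi).drop lo ++ tail) := by
  induction f with
  | zero =>
    intro s lo hi tail acc hlh hhs htl hf
    rw [wm_cfn_nil _ (by simp; omega)]
    simp [wmLoopB]
  | succ f ih =>
    intro s lo hi tail acc hlh hhs htl hf
    by_cases h5 : 5 < (hi - lo) + tail.length
    · rw [wmLoopB, if_pos h5,
        wm_fill 5 s hi tail (by omega) (by omega) hhs]
      set hi' := hi - (5 - tail.length) with hhi'
      set tail' := (s.take hi).drop hi' ++ tail with htail'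
      have hlo' : lo + 1 ≤ hi' := by omega
      have hlen' : tail'.length = 5 := by
        rw [htail']
        simp
        omega
      -- the combined list, split at hi'
      have hsplit : (s.take hi).drop lo ++ tail = (s.take hi').drop lo ++ tail' := by
        rw [htail', ← List.append_assoc]
        congr 1
        have : (s.take hi').drop lo = ((s.take hi).take hi').drop lo := by
          rw [List.take_take, min_eq_left (by omega)]
        rw [this, ← List.drop_append_of_le_length (by rw [List.length_take, List.length_take]; omega)]
        rw [List.take_append_drop]
      set comb := (s.take hi).drop lo ++ tail with hcomb
      set seg := (s.take hi').drop lo with hseg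
      have hseglen : seg.length = hi' - lo := by
        rw [hseg]
        simp
        omega
      have hcomblen : comb.length = (hi - lo) + tail.length := by
        rw [hcomb]
        simp
        omega
      rw [wm_pop0 tail' (by omega)]
      dsimp only
      rw [wm_popm1 tail'.tail (by simp [hlen'])]
      dsimp only
      -- identify the three popped words with the closed-form block entries
      have hL5 : (seg ++ tail').length - 5 = seg.length := by simp [hlen']
      have hw1 : tail'.getD 0 "" = comb.getD (comb.length - 5) "" := by
        rw [hsplit, hL5]
        simp only [List.getD_eq_getElem?_getD]
        rw [List.getElem?_append_right (le_refl _), Nat.sub_self]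
      have hw2 : s.getD lo "" = comb.getD 0 "" := by
        rw [hsplit]
        simp only [List.getD_eq_getElem?_getD]
        rw [List.getElem?_append_left (by omega), hseg, List.getElem?_drop,
          List.getElem?_take_of_lt (by omega), Nat.add_zero]
      have htl4 : tail'.tail.length = 4 := by simp [hlen']
      have hw3 : tail'.tail.getD (tail'.tail.length - 1) "" = comb.getD (comb.length - 1) "" := by
        rw [hsplit, htl4]
        have hL1 : (seg ++ tail').length - 1 = seg.length + 4 := by simp [hlen']
        rw [hL1]
        simp only [List.getD_eq_getElem?_getD]
        rw [List.getElem?_append_right (by omega), Nat.add_sub_cancel_left, List.getElem?_tail]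
      -- identify the new state's combined list with A's after-one-iteration list
      have hseg_ne : seg ≠ [] := by
        intro h
        rw [h] at hseglen
        simp at hseglen
        omega
      have hnew : (s.take hi').drop (lo + 1) ++ tail'.tail.dropLast =
          ((comb.eraseIdx (comb.length - 5)).tail).dropLast := by
        rw [hsplit, hL5, List.eraseIdx_append_of_length_le (le_refl _), Nat.sub_self,
          List.eraseIdx_zero, List.tail_append_of_ne_nil hseg_ne,
          List.dropLast_append_of_ne_nil (by intro h; have := congrArg List.length h; simp [htl4] at this)]
        congr 1
        rw [hseg, List.tail_drop]
      rw [ih s (lo + 1) hi' (tail'.tail.dropLast) _ hlo' (by omega)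
        (by simp [htl4]) (by simp [htl4]; omega)]
      rw [hnew, wm_cfn_step comb (by omega), hw1, hw2, hw3]
      simp [wmBlockN]
    · rw [wmLoopB, if_neg h5, wm_cfn_nil _ (by simp; omega)]
      simp

-- ===== VERDICT (by name: the statement is the Claim_ definition above) =====
theorem word_mixer_spec : Claim_equal_word_mixer := by
  intro wl _
  unfold Spec_word_mixer word_mixer word_mixer_alt
  rw [wm_loop wl.length _ [] (by rw [PySem.List.length_sorted])]
  rw [wm_loopB _ _ 0 _ [] [] (by omega) (by omega) (by simp) (by simp; omega)]
  rw [List.nil_append, List.drop_zero, List.append_nil,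
    show (PySem.List.sorted wl (fun x => x) false).length = wl.length from by rw [PySem.List.length_sorted],
    show List.take wl.length (PySem.List.sorted wl (fun x => x) false) = PySem.List.sorted wl (fun x => x) false from by
      conv_lhs => rw [show wl.length = (PySem.List.sorted wl (fun x => x) false).length from by rw [PySem.List.length_sorted]]
      exact List.take_length]
  simp
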